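-- pv_equiv track=rewrite | github.com/anastasya-kl/films-recommendations-module | modules/reccomendation_module.py | find_most_similar_with_intersections
-- ===== SOURCE A (Python) =====
-- def find_most_similar_with_intersections(film_data, other_films_data):
--     current_values = next(iter(film_data.values()))
--     similar_key_pairs = []
--
--     for key, values in other_films_data.items():
--         intersection = len(set(values).intersection(set(current_values)))
--         if intersection != 0:
--             similar_key_pairs.append((key, intersection))
--
--     similar_key_pairs.sort(key=lambda x: x[1], reverse=True)
--     return [film_id for film_id, _ in similar_key_pairs]
-- ===== SOURCE B (Python) =====
-- def find_most_similar_with_intersections(film_data, other_films_data):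
--     current_values = next(iter(film_data.values()))
--     # inverted index: value -> list of film keys whose (distinct) values contain it
--     index = {}
--     for key, values in other_films_data.items():
--         for v in set(values):
--             index.setdefault(v, []).append(key)
--     # count, per film key, how many distinct current values it shares
--     counts = {}
--     for v in set(current_values):
--         for key in index.get(v, []):
--             counts[key] = counts.get(key, 0) + 1
--     pairs = [(key, counts[key]) for key in other_films_data if key in counts]
--     pairs.sort(key=lambda p: p[1], reverse=True)
--     return [key for key, _ in pairs]
-- ===== Notes on version B (the rewrite author's own statement) =====
-- stated objective: alternative
-- what changed: Replaces the per-film set-intersection loop by an inverted index (value -> film keys) built once, then a single scan over the current film's distinct values that increments per-film counters; pairs are emitted in dict order and stably reverse-sorted as before.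
import Mathlib
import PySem

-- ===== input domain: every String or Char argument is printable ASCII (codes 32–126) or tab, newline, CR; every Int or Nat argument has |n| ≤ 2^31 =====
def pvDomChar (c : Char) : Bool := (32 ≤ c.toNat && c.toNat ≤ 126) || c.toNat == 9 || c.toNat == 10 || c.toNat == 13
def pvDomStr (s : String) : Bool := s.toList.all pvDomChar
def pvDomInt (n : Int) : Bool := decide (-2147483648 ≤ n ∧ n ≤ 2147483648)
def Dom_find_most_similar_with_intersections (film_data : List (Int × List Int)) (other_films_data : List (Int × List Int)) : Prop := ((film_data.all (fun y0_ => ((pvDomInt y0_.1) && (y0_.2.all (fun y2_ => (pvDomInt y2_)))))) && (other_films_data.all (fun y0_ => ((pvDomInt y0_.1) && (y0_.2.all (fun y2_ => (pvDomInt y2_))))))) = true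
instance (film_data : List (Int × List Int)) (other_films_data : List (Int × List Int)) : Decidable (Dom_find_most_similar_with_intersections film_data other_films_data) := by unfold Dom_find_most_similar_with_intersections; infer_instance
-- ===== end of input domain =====

-- B replaces the per-film set-intersection loop by an inverted index (value → film keys)
-- plus per-film counters filled by one scan over the current film's distinct values
-- (alternative decomposition; same stable reverse sort at the end).

-- ===== PORT A =====
def find_most_similar_with_intersections (film_data : List (Int × List Int)) (other_films_data : List (Int × List Int)) : List Int :=
  match film_data with
  | [] => []   -- unreachable under Pre_: next(iter(film_data.values())) raises StopIteration
  | (_, current_values) :: _ =>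
    let similar_key_pairs : List (Int × Int) :=
      other_films_data.foldl (fun acc kv =>
        let intersection : Int :=
          ((PySem.Set.inter (PySem.Set.ofList kv.2) (PySem.Set.ofList current_values)).length : Int)
        if intersection ≠ 0 then acc ++ [(kv.1, intersection)] else acc) []
    (PySem.List.sorted similar_key_pairs (fun x => x.2) true).map (fun x => x.1)

-- ===== PORT B =====
def find_most_similar_with_intersections_alt (film_data : List (Int × List Int)) (other_films_data : List (Int × List Int)) : List Int :=
  match film_data with
  | [] => []   -- unreachable under Pre_: next(iter(film_data.values())) raises StopIteration
  | (_, current_values) :: _ =>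
    let index : PySem.Dict Int (List Int) :=
      other_films_data.foldl (fun d kv =>
        (PySem.Set.ofList kv.2).foldl (fun d v => d.modify v [] (· ++ [kv.1])) d) PySem.Dict.empty
    let counts : PySem.Dict Int Int :=
      (PySem.Set.ofList current_values).foldl (fun c v =>
        (index.getD v []).foldl (fun c k => c.modify k 0 (· + 1)) c) PySem.Dict.empty
    let pairs : List (Int × Int) :=
      other_films_data.filterMap (fun kv => (counts.get? kv.1).map (fun n => (kv.1, n)))
    (PySem.List.sorted pairs (fun p => p.2) true).map (fun p => p.1)

-- ===== PRECONDITION & SPEC =====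
-- Pre_ excludes (i) empty film_data, on which A raises StopIteration, and (ii) association
-- lists whose other_films_data has duplicate keys, which represent no Python dict input.
def Pre_find_most_similar_with_intersections (film_data : List (Int × List Int)) (other_films_data : List (Int × List Int)) : Prop :=
  film_data ≠ [] ∧ (other_films_data.map Prod.fst).Nodup
instance (film_data : List (Int × List Int)) (other_films_data : List (Int × List Int)) : Decidable (Pre_find_most_similar_with_intersections film_data other_films_data) := by unfold Pre_find_most_similar_with_intersections; infer_instance
def pvWitness_find_most_similar_with_intersections : (List (Int × List Int)) × (List (Int × List Int)) :=
  ([(1, [2, 3])], [(4, [3, 5]), (6, [9])])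
def Spec_find_most_similar_with_intersections (film_data : List (Int × List Int)) (other_films_data : List (Int × List Int)) (out : List Int) : Prop := out = find_most_similar_with_intersections_alt film_data other_films_data
instance (film_data : List (Int × List Int)) (other_films_data : List (Int × List Int)) (out : List Int) : Decidable (Spec_find_most_similar_with_intersections film_data other_films_data out) := by unfold Spec_find_most_similar_with_intersections; infer_instance

-- ===== CLAIM (what is proved, stated in full; the proofs are below) =====
def Claim_equal_find_most_similar_with_intersections : Prop := ∀ (film_data : List (Int × List Int)) (other_films_data : List (Int × List Int)), Dom_find_most_similar_with_intersections film_data other_films_data → Pre_find_most_similar_with_intersections film_data other_films_data → Spec_find_most_similar_with_intersections film_data other_films_data (find_most_similar_with_intersections film_data other_films_data)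

-- ===== LEMMAS AND PROOFS =====

-- the inverted index flattened to a pair list: (value, key) for each distinct value of each film
def pvP (ofd : List (Int × List Int)) : List (Int × Int) :=
  ofd.flatMap (fun kv => (PySem.Set.ofList kv.2).map (fun v => (v, kv.1)))

theorem pv_foldl_foldl_eq_flatMap {α β γ : Type} (l : List α) (f : α → List β) (g : γ → β → γ) (init : γ) :
    l.foldl (fun d a => (f a).foldl g d) init = (l.flatMap f).foldl g init := by
  induction l generalizing init with
  | nil => rfl
  | cons x xs ih => simp [List.flatMap_cons, List.foldl_append, ih]

theorem pv_index_eq (ofd : List (Int × List Int)) :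
    ofd.foldl (fun d kv => (PySem.Set.ofList kv.2).foldl (fun d v => d.modify v [] (· ++ [kv.1])) d) PySem.Dict.empty
      = (pvP ofd).foldl (fun d p => d.modify p.1 [] (· ++ [p.2])) PySem.Dict.empty := by
  rw [pvP, ← pv_foldl_foldl_eq_flatMap]
  simp [List.foldl_map]

theorem pv_filter_ofList_eq (v : Int) (xs : List Int) :
    (PySem.Set.ofList xs).filter (fun u => u == v) = if v ∈ xs then [v] else [] := by
  rw [List.filter_beq]
  by_cases hv : v ∈ xs
  · rw [List.count_eq_one_of_mem (PySem.Set.nodup_ofList xs) ((PySem.Set.mem_ofList _ _).2 hv)]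
    simp [hv]
  · rw [List.count_eq_zero_of_not_mem (fun h => hv ((PySem.Set.mem_ofList _ _).1 h))]
    simp [hv]

theorem pv_P_filter (ofd : List (Int × List Int)) (v : Int) :
    ((pvP ofd).filter (fun p => p.1 == v)).map (fun p => p.2)
      = (ofd.filter (fun kv => decide (v ∈ kv.2))).map (fun kv => kv.1) := by
  induction ofd with
  | nil => rfl
  | cons kv t ih =>
    rw [pvP, List.flatMap_cons, List.filter_append, List.map_append, ← pvP, ih]
    have h : ((PySem.Set.ofList kv.2).map (fun v => (v, kv.1))).filter (fun p => p.1 == v)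
        = ((PySem.Set.ofList kv.2).filter (fun u => u == v)).map (fun v => (v, kv.1)) := by
      rw [List.filter_map]; rfl
    rw [h, pv_filter_ofList_eq]
    by_cases hv : v ∈ kv.2 <;> simp [hv]

-- per-value lookup in the inverted index
theorem pv_index_getD (ofd : List (Int × List Int)) (v : Int) :
    ((pvP ofd).foldl (fun d p => d.modify p.1 [] (· ++ [p.2])) PySem.Dict.empty).getD v []
      = (ofd.filter (fun kv => decide (v ∈ kv.2))).map (fun kv => kv.1) := by
  rw [PySem.Dict.getD_foldl_modify_append, ← pv_P_filter]
  simp [pysem]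

-- with unique keys, an entry's key occurs in the per-value key list iff the entry holds the value
theorem pv_count_key (ofd : List (Int × List Int)) (hnd : (ofd.map Prod.fst).Nodup)
    (kv : Int × List Int) (hin : kv ∈ ofd) (v : Int) :
    ((ofd.filter (fun kv' => decide (v ∈ kv'.2))).map (fun kv' => kv'.1)).count kv.1
      = if v ∈ kv.2 then 1 else 0 := by
  induction ofd with
  | nil => cases hin
  | cons hd t ih =>
    rw [List.map_cons] at hnd
    have hnd' := hnd.of_cons
    have hhd : hd.1 ∉ t.map Prod.fst := by
      intro h; exact (List.nodup_cons.1 hnd).1 h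
    rcases List.mem_cons.1 hin with rfl | hkt
    · have hz : ((t.filter (fun kv' => decide (v ∈ kv'.2))).map (fun kv' => kv'.1)).count kv.1 = 0 := by
        apply List.count_eq_zero_of_not_mem
        intro h
        apply hhd
        rcases List.mem_map.1 h with ⟨p, hp, hpe⟩
        exact hpe ▸ List.mem_map_of_mem (List.mem_of_mem_filter hp)
      by_cases hv : v ∈ kv.2 <;> simp [hv, hz]
    · have hne : hd.1 ≠ kv.1 := by
        intro h; exact hhd (h ▸ List.mem_map_of_mem hkt)
      have := ih hnd' hkt
      by_cases hv : v ∈ hd.2 <;>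
        simp [hv, this, hne]

theorem pv_count_flatMap {α : Type} [DecidableEq α] (l : List α) (g : α → List Int) (k : Int)
    (p : α → Bool) (hg : ∀ v, (g v).count k = if p v then 1 else 0) :
    (l.flatMap g).count k = (l.filter p).length := by
  induction l with
  | nil => rfl
  | cons x xs ih =>
    rw [List.flatMap_cons, List.count_append, ih, hg, List.filter_cons]
    by_cases hp : p x = true <;> simp [hp, Nat.add_comm]

-- symmetry of the intersection count over duplicate-free lists
theorem pv_len_filter_toFinset (a b : List Int) (ha : a.Nodup) :
    (a.filter (· ∈ b)).length = (a.toFinset ∩ b.toFinset).card := by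
  have h1 : (a.filter (· ∈ b)).toFinset.card = (a.filter (· ∈ b)).length :=
    List.toFinset_card_of_nodup (ha.filter _)
  rw [← h1, List.toFinset_filter]
  congr 1
  ext x
  simp [Finset.mem_filter, List.mem_toFinset]

theorem pv_len_filter_comm (a b : List Int) (ha : a.Nodup) (hb : b.Nodup) :
    (a.filter (· ∈ b)).length = (b.filter (· ∈ a)).length := by
  rw [pv_len_filter_toFinset a b ha, pv_len_filter_toFinset b a hb, Finset.inter_comm]

-- A's intersection size for one film entry
def pvInter (cur : List Int) (kv : Int × List Int) : Int :=
  ((PySem.Set.inter (PySem.Set.ofList kv.2) (PySem.Set.ofList cur)).length : Int)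

-- B's counts dict, after flattening, queried at a key of other_films_data
theorem pv_counts_get? (cur : List Int) (ofd : List (Int × List Int))
    (hnd : (ofd.map Prod.fst).Nodup) (kv : Int × List Int) (hin : kv ∈ ofd) :
    (((PySem.Set.ofList cur).foldl (fun c v =>
        (((pvP ofd).foldl (fun d p => d.modify p.1 [] (· ++ [p.2])) PySem.Dict.empty).getD v []).foldl
          (fun c k => c.modify k 0 (· + 1)) c) (PySem.Dict.empty : PySem.Dict Int Int)).get? kv.1)
      = if pvInter cur kv ≠ 0 then some (pvInter cur kv) else none := by
  rw [pv_foldl_foldl_eq_flatMap]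
  set Q : List Int := (PySem.Set.ofList cur).flatMap (fun v =>
    ((pvP ofd).foldl (fun d p => d.modify p.1 [] (· ++ [p.2])) PySem.Dict.empty).getD v []) with hQ
  set C := Q.foldl (fun c k => c.modify k 0 (· + 1)) (PySem.Dict.empty : PySem.Dict Int Int) with hC
  -- count of kv.1 in Q = intersection size (via symmetry)
  have hcount : Q.count kv.1 = (PySem.Set.inter (PySem.Set.ofList kv.2) (PySem.Set.ofList cur)).length := by
    have h1 : Q.count kv.1
        = ((PySem.Set.ofList cur).filter (fun v => decide (v ∈ kv.2))).length := by
      rw [hQ]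
      apply pv_count_flatMap
      intro v
      rw [pv_index_getD]
      simpa using pv_count_key ofd hnd kv hin v
    have h2 : ((PySem.Set.ofList cur).filter (fun v => decide (v ∈ kv.2))).length
        = ((PySem.Set.ofList kv.2).filter (fun x => decide (x ∈ cur))).length := by
      have ha : ((PySem.Set.ofList cur).filter (fun v => decide (v ∈ kv.2))).length
          = ((PySem.Set.ofList cur).filter (fun v => decide (v ∈ PySem.Set.ofList kv.2))).length := by
        congr 1; apply List.filter_congr; intro x _; simp [PySem.Set.mem_ofList]
      have hb : ((PySem.Set.ofList kv.2).filter (fun x => decide (x ∈ cur))).length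
          = ((PySem.Set.ofList kv.2).filter (fun x => decide (x ∈ PySem.Set.ofList cur))).length := by
        congr 1; apply List.filter_congr; intro x _; simp [PySem.Set.mem_ofList]
      rw [ha, hb]
      exact pv_len_filter_comm _ _ (PySem.Set.nodup_ofList cur) (PySem.Set.nodup_ofList kv.2)
    have h3 : (PySem.Set.inter (PySem.Set.ofList kv.2) (PySem.Set.ofList cur)).length
        = ((PySem.Set.ofList kv.2).filter (fun x => decide (x ∈ cur))).length := by
      rw [PySem.Set.inter]
      congr 1; apply List.filter_congr; intro x _
      simp [PySem.Set.mem_ofList]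
    rw [h1, h2, h3]
  have hgetD : C.getD kv.1 0 = (Q.count kv.1 : Int) := by
    rw [hC, PySem.Dict.getD_foldl_modify_add_one]
    simp [pysem]
  have hkeys : kv.1 ∈ C.keys ↔ kv.1 ∈ Q := by
    rw [hC, PySem.Dict.keys_foldl_modify]
    simp [pysem]
  rw [pvInter, ← hcount]
  by_cases hmem : kv.1 ∈ Q
  · have hpos : Q.count kv.1 ≠ 0 := by
      have := List.count_pos_iff.mpr hmem; omega
    have hsome : C.get? kv.1 ≠ none := by
      rw [Ne, PySem.Dict.get?_eq_none_iff_not_mem_keys _ _, not_not]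
      exact hkeys.2 hmem
    obtain ⟨c, hc⟩ := Option.ne_none_iff_exists'.1 hsome
    have : c = (Q.count kv.1 : Int) := by
      rw [← hgetD, PySem.Dict.getD_eq_get?_getD, hc]; rfl
    rw [hc, this, if_pos (by exact_mod_cast hpos)]
  · have hzero : Q.count kv.1 = 0 := List.count_eq_zero_of_not_mem hmem
    rw [(PySem.Dict.get?_eq_none_iff_not_mem_keys _ _).2 (fun h => hmem (hkeys.1 h))]
    rw [hzero]
    simp

-- the two pair lists are equal entry by entry
theorem pv_pairs_eq (cur : List Int) (ofd : List (Int × List Int))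
    (hnd : (ofd.map Prod.fst).Nodup) (l : List (Int × List Int)) (hl : ∀ kv ∈ l, kv ∈ ofd)
    (acc : List (Int × Int)) :
    l.foldl (fun acc kv =>
        if pvInter cur kv ≠ 0 then acc ++ [(kv.1, pvInter cur kv)] else acc) acc
      = acc ++ l.filterMap (fun kv =>
          (((PySem.Set.ofList cur).foldl (fun c v =>
              (((pvP ofd).foldl (fun d p => d.modify p.1 [] (· ++ [p.2])) PySem.Dict.empty).getD v []).foldl
                (fun c k => c.modify k 0 (· + 1)) c) (PySem.Dict.empty : PySem.Dict Int Int)).get? kv.1).map (fun n => (kv.1, n))) := by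
  induction l generalizing acc with
  | nil => simp
  | cons kv t ih =>
    rw [List.foldl_cons, List.filterMap_cons,
      pv_counts_get? cur ofd hnd kv (hl kv (List.mem_cons_self)),
      ih (fun x hx => hl x (List.mem_cons_of_mem _ hx))]
    by_cases h : pvInter cur kv ≠ 0 <;> simp [h]

-- ===== VERDICT (by name: the statement is the Claim_ definition above) =====
theorem find_most_similar_with_intersections_spec : Claim_equal_find_most_similar_with_intersections := by
  intro film_data other_films_data _ hpre
  obtain ⟨hne, hnd⟩ := hpre
  unfold Spec_find_most_similar_with_intersections
  match film_data with
  | [] => exact absurd rfl hne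
  | (k, cur) :: rest =>
    show (PySem.List.sorted (other_films_data.foldl (fun acc kv =>
        if pvInter cur kv ≠ 0 then acc ++ [(kv.1, pvInter cur kv)] else acc) []) (fun x => x.2) true).map (fun x => x.1)
      = _
    rw [find_most_similar_with_intersections_alt, pv_index_eq,
      pv_pairs_eq cur other_films_data hnd other_films_data (fun _ h => h) []]
    simp
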